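-- pv_equiv track=rewrite | github.com/Ting-Kim/CodingTest_with_py | programmers/k-digital/2.py | solution
-- ===== SOURCE A (Python) =====
-- from collections import deque
--
-- def solution(arr1, arr2):
--     answer = 0
--     flush = -1
--     flag = False
--     arr_dict1 = {}
--     arr_dict2 = {}
--     for val in arr1:
--         try:
--             arr_dict1[val] += 1
--         except:
--             arr_dict1[val] = 1
--     arr_new1 = list(arr_dict1.keys())
--     len_arr_new1 = len(arr_new1)
--
--     for val in arr2:
--         try:
--             arr_dict2[val] += 1
--         except:
--             arr_dict2[val] = 1
--     arr_new2 = list(arr_dict2.keys())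
--     len_arr_new2 = len(arr_new2)
--
--     for i in range(len_arr_new1):
--         if arr_new1[i][0] == ")":
--             continue
--         for j in range(len_arr_new2):
--             if (len(arr_new1[i]) + len(arr_new2[j])) % 2 != 0:
--                 continue
--
--             check = arr_new1[i] + arr_new2[j]
--
--             stack = deque()
--             for index in range(len(check)):
--                 if check[index] == "(":
--                     stack.append(check[index])
--                 else:
--                     if stack:  # 스택이 비어있지 않다면
--                         if stack[-1] == "(":
--                             flush = stack.pop()
--                     else:  # 스택이 비어있으면
--                         flag = True
--                         break  # 에러 발생
--             if flag or stack:
--                 flag = False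
--                 continue
--             answer += arr_dict1[arr_new1[i]] * arr_dict2[arr_new2[j]]
--
--     return answer
-- ===== SOURCE B (Python) =====
-- from collections import Counter
--
--
-- def sig(s):
--     # reduce a string to its parenthesis signature (deficit, surplus),
--     # treating every non-'(' character as a closer, as A's stack loop does
--     d = o = 0
--     for c in s:
--         if c == "(":
--             o += 1
--         elif o > 0:
--             o -= 1
--         else:
--             d += 1
--     return (d, o)
--
--
-- def solution(arr1, arr2):
--     c2 = Counter(sig(y) for y in arr2)
--     answer = 0
--     for x in arr1:
--         d, o = sig(x)
--         if d == 0: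
--             answer += c2[(o, 0)]
--     return answer
-- ===== Notes on version B (the rewrite author's own statement) =====
-- stated objective: faster
-- what changed: A deduplicates both lists and runs an explicit stack simulation over the concatenation of every key pair (plus a redundant parity guard and first-character skip); B reduces each string once to its (deficit, surplus) signature, buckets arr2's signatures in a Counter, and for each x in arr1 with deficit 0 adds the bucket count of (surplus, 0) - no pairwise scan at all.
-- outside the precondition, e.g. on solution([''], ['()']): A raises IndexError, B returns 1
import Mathlib
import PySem

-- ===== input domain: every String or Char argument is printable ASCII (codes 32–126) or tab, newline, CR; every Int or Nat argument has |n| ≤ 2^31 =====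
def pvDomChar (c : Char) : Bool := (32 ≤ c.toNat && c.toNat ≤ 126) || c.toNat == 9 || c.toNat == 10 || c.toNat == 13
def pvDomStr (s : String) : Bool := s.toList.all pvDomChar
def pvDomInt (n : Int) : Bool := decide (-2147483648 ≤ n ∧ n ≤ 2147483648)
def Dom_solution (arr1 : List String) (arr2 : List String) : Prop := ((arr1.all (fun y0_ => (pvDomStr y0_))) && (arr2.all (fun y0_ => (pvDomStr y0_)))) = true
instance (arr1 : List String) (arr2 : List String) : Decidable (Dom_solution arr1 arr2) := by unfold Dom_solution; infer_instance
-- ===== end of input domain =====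

-- B replaces A's all-pairs stack check by per-string (deficit, surplus) signatures bucketed in a
-- counter; equivalence is about the return value only (neither version mutates its arguments).

-- ===== PORT A =====
-- A's inner stack loop over check = arr_new1[i] + arr_new2[j]; the stack's top is kept at the
-- head (Python's deque pushes and pops at its right end — same stack, mirrored). Returns the
-- final stack and the flag.
def loopA : List Char → List Char → List Char × Bool
  | [], st => (st, false)
  | c :: cs, st =>
    if c = '(' then loopA cs (c :: st)
    else
      match st with
      | [] => ([], true)
      | t :: rest => if t = '(' then loopA cs rest else loopA cs (t :: rest)

def solution (arr1 : List String) (arr2 : List String) : Int :=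
  -- the try/except blocks build counters of arr1 and arr2
  let d1 := arr1.foldl (fun d v => d.modify v 0 (· + 1)) PySem.Dict.empty
  let d2 := arr2.foldl (fun d v => d.modify v 0 (· + 1)) PySem.Dict.empty
  let keys1 := d1.keys
  let keys2 := d2.keys
  keys1.foldl (fun answer k1 =>
    -- arr_new1[i][0] == ")" — raises IndexError on "" (excluded by Pre_solution)
    if PySem.Str.pyGet? k1 0 = some ')' then answer
    else keys2.foldl (fun answer k2 =>
      if PySem.Int.mod (PySem.Str.len k1 + PySem.Str.len k2) 2 ≠ 0 then answer
      else
        let r := loopA (k1.toList ++ k2.toList) []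
        if r.2 || !r.1.isEmpty then answer
        else answer + d1.getD k1 0 * d2.getD k2 0) answer) 0

-- ===== PORT B =====
-- Source B's sig: fold computing (deficit, surplus); every non-'(' character is a closer
def sigA : Int → Int → List Char → Int × Int
  | d, o, [] => (d, o)
  | d, o, c :: cs =>
    if c = '(' then sigA d (o + 1) cs
    else if 0 < o then sigA d (o - 1) cs
    else sigA (d + 1) o cs

def sigB (s : String) : Int × Int := sigA 0 0 s.toList

def solution_alt (arr1 : List String) (arr2 : List String) : Int :=
  let c2 := PySem.Dict.counter (arr2.map sigB)
  arr1.foldl (fun answer x =>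
    let p := sigB x
    if p.1 = 0 then answer + c2.getD (p.2, 0) 0 else answer) 0

-- ===== PRECONDITION & SPEC =====
-- Pre_ excludes arr1 containing the empty string, on which A raises IndexError at arr_new1[i][0].
def Pre_solution (arr1 : List String) (arr2 : List String) : Prop := "" ∉ arr1
instance (arr1 : List String) (arr2 : List String) : Decidable (Pre_solution arr1 arr2) := by
  unfold Pre_solution; infer_instance

def pvWitness_solution : List String × List String := (["()"], ["()"])

def Spec_solution (arr1 : List String) (arr2 : List String) (out : Int) : Prop := out = solution_alt arr1 arr2
instance (arr1 : List String) (arr2 : List String) (out : Int) : Decidable (Spec_solution arr1 arr2 out) := by unfold Spec_solution; infer_instance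

-- ===== CLAIM (what is proved, stated in full; the proofs are below) =====
def Claim_equal_solution : Prop := ∀ (arr1 : List String) (arr2 : List String), Dom_solution arr1 arr2 → Pre_solution arr1 arr2 → Spec_solution arr1 arr2 (solution arr1 arr2)

-- ===== LEMMAS AND PROOFS =====

-- Proof-side signature: nsig cs = (deficit, surplus) of cs, by head recursion over Nat.
def nsig : List Char → Nat × Nat
  | [] => (0, 0)
  | c :: cs =>
    let p := nsig cs
    if c = '(' then (p.1 - 1, p.2 + (1 - p.1)) else (p.1 + 1, p.2)

-- Proof-side abstraction of A's stack loop: height n; none = flag raised.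
def run : List Char → Nat → Option Nat
  | [], n => some n
  | c :: cs, n =>
    if c = '(' then run cs (n + 1)
    else match n with
      | 0 => none
      | m + 1 => run cs m

-- the pair-acceptance predicate both programs compute
abbrev Pacc (x y : String) : Prop :=
  (nsig x.toList).1 = 0 ∧ (nsig y.toList).1 = (nsig x.toList).2 ∧ (nsig y.toList).2 = 0

lemma loopA_replicate (cs : List Char) : ∀ n : Nat,
    loopA cs (List.replicate n '(') =
      match run cs n with
      | some m => (List.replicate m '(', false)
      | none => ([], true) := by
  induction cs with
  | nil => intro n; simp [loopA, run]
  | cons c cs ih =>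
    intro n
    by_cases hc : c = '('
    · simpa [loopA, run, hc, ← List.replicate_succ] using ih (n + 1)
    · cases n with
      | zero => simp [loopA, run, hc]
      | succ m => simpa [loopA, run, hc, List.replicate_succ] using ih m

lemma run_append (xs ys : List Char) : ∀ n : Nat,
    run (xs ++ ys) n = (run xs n).bind (run ys) := by
  induction xs with
  | nil => intro n; simp [run]
  | cons c cs ih =>
    intro n
    by_cases hc : c = '('
    · simp [run, hc, ih]
    · cases n with
      | zero => simp [run, hc]
      | succ m => simp [run, hc, ih]

lemma run_nsig (cs : List Char) : ∀ n : Nat,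
    run cs n = if (nsig cs).1 ≤ n then some (n - (nsig cs).1 + (nsig cs).2) else none := by
  induction cs with
  | nil => intro n; simp [run, nsig]
  | cons c cs ih =>
    intro n
    by_cases hc : c = '('
    · rw [show run (c :: cs) n = run cs (n + 1) by simp [run, hc], ih]
      simp only [nsig, hc, if_true, reduceIte]
      split_ifs <;> first | (simp only [Option.some.injEq]; omega) | rfl | omega
    · cases n with
      | zero =>
        rw [show run (c :: cs) 0 = none by simp [run, hc]]
        simp only [nsig, hc, if_neg hc, reduceIte]
        split_ifs <;> first | rfl | omega
      | succ m =>
        rw [show run (c :: cs) (m + 1) = run cs m by simp [run, hc], ih]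
        simp only [nsig, hc, if_neg hc, reduceIte]
        split_ifs <;> first | (simp only [Option.some.injEq]; omega) | rfl | omega

lemma sigA_nsig (cs : List Char) : ∀ d o : Nat,
    sigA (d : Int) (o : Int) cs =
      (((d + ((nsig cs).1 - o) : Nat) : Int), (((nsig cs).2 + (o - (nsig cs).1) : Nat) : Int)) := by
  induction cs with
  | nil => intro d o; simp [sigA, nsig]
  | cons c cs ih =>
    intro d o
    by_cases hc : c = '('
    · rw [show sigA (d : Int) (o : Int) (c :: cs) = sigA (d : Int) ((o : Int) + 1) cs by
        simp [sigA, hc]]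
      rw [show ((o : Int) + 1) = ((o + 1 : Nat) : Int) by push_cast; ring, ih d (o + 1)]
      simp only [nsig, hc, reduceIte, Prod.mk.injEq, Nat.cast_inj]
      omega
    · cases o with
      | zero =>
        rw [show sigA (d : Int) ((0 : Nat) : Int) (c :: cs) = sigA ((d : Int) + 1) 0 cs by
          simp [sigA, hc]]
        rw [show ((d : Int) + 1) = ((d + 1 : Nat) : Int) by push_cast; ring,
          show (0 : Int) = ((0 : Nat) : Int) by simp, ih (d + 1) 0]
        simp only [nsig, hc, reduceIte, Prod.mk.injEq, Nat.cast_inj]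
        omega
      | succ m =>
        rw [show sigA (d : Int) ((m + 1 : Nat) : Int) (c :: cs) = sigA (d : Int) (m : Int) cs by
          have h1 : (0 : Int) < ((m + 1 : Nat) : Int) := by positivity
          simp [sigA, hc, h1], ih d m]
        simp only [nsig, hc, reduceIte, Prod.mk.injEq, Nat.cast_inj]
        omega

lemma sigB_eq (s : String) :
    sigB s = (((nsig s.toList).1 : Int), ((nsig s.toList).2 : Int)) := by
  have h := sigA_nsig s.toList 0 0
  simpa [sigB] using h

-- A's per-pair acceptance (stack run on the concatenation) is Pacc
lemma accept_iff (x y : String) :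
    (run (x.toList ++ y.toList) 0 = some 0) ↔ Pacc x y := by
  rw [run_append x.toList y.toList 0]
  simp only [run_nsig, Pacc]
  by_cases hd : (nsig x.toList).1 ≤ 0
  · simp only [if_pos hd, Option.bind_some]
    by_cases h2 : (nsig y.toList).1 ≤ 0 - (nsig x.toList).1 + (nsig x.toList).2
    · simp only [if_pos h2, Option.some.injEq]
      omega
    · simp only [if_neg h2]
      constructor
      · intro h; simp at h
      · intro h; exfalso; omega
  · simp only [if_neg hd, Option.bind_none]
    constructor
    · intro h; simp at h
    · intro h; exfalso; omega

-- parity of a signature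
lemma nsig_parity (cs : List Char) :
    ((nsig cs).1 + (nsig cs).2) % 2 = cs.length % 2 := by
  induction cs with
  | nil => simp [nsig]
  | cons c cs ih =>
    by_cases hc : c = '(' <;> simp only [nsig, hc, reduceIte, List.length_cons] <;> omega

-- accepted pairs have even total length, so A's parity guard never rejects one
lemma pacc_even (x y : String) (h : Pacc x y) :
    (x.toList.length + y.toList.length) % 2 = 0 := by
  obtain ⟨h1, h2, h3⟩ := h
  have hx := nsig_parity x.toList
  have hy := nsig_parity y.toList
  omega

-- a string starting with ')' is never the left member of an accepted pair
lemma pacc_head (x y : String) (c : Char) (rest : List Char)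
    (hx : x.toList = ')' :: rest) : ¬ Pacc x y := by
  intro ⟨h1, _, _⟩
  rw [hx] at h1
  simp [nsig] at h1

-- ∑ over a nodup list of an indicator-weighted g collapses at x
lemma sum_ite_eq_of_nodup {α : Type} [DecidableEq α] (g : α → Int) (x : α) :
    ∀ ks : List α, ks.Nodup → x ∈ ks →
      (ks.map (fun k => if k = x then g k else 0)).sum = g x := by
  intro ks
  induction ks with
  | nil => simp
  | cons k ks ih =>
    intro hnd hmem
    by_cases hk : k = x
    · subst hk
      have hzero : (ks.map (fun k' => if k' = k then g k' else 0)).sum = 0 := by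
        apply List.sum_eq_zero
        intro z hz
        simp only [List.mem_map] at hz
        obtain ⟨k', hk', rfl⟩ := hz
        have hne : k' ≠ k := fun e => (List.nodup_cons.mp hnd).1 (e ▸ hk')
        simp [hne]
      simp only [List.map_cons, List.sum_cons, if_pos rfl, hzero, reduceIte]
      ring
    · have h : x ∈ ks := by
        rcases List.mem_cons.mp hmem with h | h
        · exact absurd h.symm hk
        · exact h
      simp only [List.map_cons, List.sum_cons, if_neg hk]
      rw [ih (List.nodup_cons.mp hnd).2 h]
      ring

-- summing count l k * g k over any nodup cover of l is summing g over l
lemma sum_count_mul {α : Type} [DecidableEq α] (g : α → Int) :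
    ∀ (l ks : List α), ks.Nodup → (∀ x ∈ l, x ∈ ks) →
      (ks.map (fun k => (l.count k : Int) * g k)).sum = (l.map g).sum := by
  intro l
  induction l with
  | nil => intro ks _ _; simp
  | cons x l ih =>
    intro ks hnd hcov
    have hx : x ∈ ks := hcov x (List.mem_cons_self)
    have hcov' : ∀ y ∈ l, y ∈ ks := fun y hy => hcov y (List.mem_cons_of_mem _ hy)
    have hsplit : ∀ k, ((x :: l).count k : Int) * g k
        = (l.count k : Int) * g k + (if k = x then g k else 0) := by
      intro k
      by_cases hk : k = x
      · subst hk; rw [List.count_cons_self]; push_cast; simp; ring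
      · rw [List.count_cons_of_ne (by exact fun h => hk h.symm)]; simp [hk]
    calc (ks.map (fun k => ((x :: l).count k : Int) * g k)).sum
        = (ks.map (fun k => (l.count k : Int) * g k + (if k = x then g k else 0))).sum := by
          exact congrArg _ (List.map_congr_left (fun k _ => hsplit k))
      _ = (ks.map (fun k => (l.count k : Int) * g k)).sum
          + (ks.map (fun k => if k = x then g k else 0)).sum := by
          rw [← List.sum_map_add]
      _ = (l.map g).sum + g x := by rw [ih ks hnd hcov', sum_ite_eq_of_nodup g x ks hnd hx]
      _ = ((x :: l).map g).sum := by simp; ring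

-- B's per-string contribution is the indicator sum over arr2
lemma B_perstring (arr2 : List String) (x : String) :
    (if (sigB x).1 = 0 then (PySem.Dict.counter (arr2.map sigB)).getD ((sigB x).2, 0) 0 else 0)
      = (arr2.map (fun y => if Pacc x y then (1 : Int) else 0)).sum := by
  by_cases hx : (nsig x.toList).1 = 0
  · have hx1 : (sigB x).1 = 0 := by rw [sigB_eq]; simpa using hx
    rw [if_pos hx1, PySem.Dict.getD_counter]
    rw [show (fun y => if Pacc x y then (1 : Int) else 0)
        = (fun y => if decide (Pacc x y) = true then (1 : Int) else 0) by funext y; simp]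
    rw [PySem.List.sum_map_ite_one_zero]
    congr 1
    rw [List.count_eq_countP, List.countP_map]
    apply List.countP_congr
    intro y _
    rw [Bool.eq_iff_iff]
    simp only [Function.comp_apply, beq_iff_eq, decide_eq_true_eq, sigB_eq, Pacc, Prod.mk.injEq]
    simp only [iff_true]
    constructor
    · rintro ⟨h1, h2⟩
      exact ⟨hx, by exact_mod_cast h1, by exact_mod_cast h2⟩
    · rintro ⟨_, h1, h2⟩
      exact ⟨by exact_mod_cast h1, by exact_mod_cast h2⟩
  · have hx1 : ¬ (sigB x).1 = 0 := by rw [sigB_eq]; simpa using hx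
    rw [if_neg hx1]
    symm
    apply List.sum_eq_zero
    intro z hz
    simp only [List.mem_map] at hz
    obtain ⟨y, _, rfl⟩ := hz
    have : ¬ Pacc x y := fun h => hx h.1
    simp [this]

lemma B_eq (arr1 arr2 : List String) :
    solution_alt arr1 arr2
      = (arr1.map (fun x => (arr2.map (fun y => if Pacc x y then (1 : Int) else 0)).sum)).sum := by
  rw [show solution_alt arr1 arr2 = arr1.foldl (fun answer x =>
      if (sigB x).1 = 0 then answer + (PySem.Dict.counter (arr2.map sigB)).getD ((sigB x).2, 0) 0
      else answer) 0 from rfl]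
  rw [PySem.List.foldl_congr_mem arr1 _
    (fun ans x => ans + (arr2.map (fun y => if Pacc x y then (1 : Int) else 0)).sum) 0 ?_]
  · rw [PySem.List.foldl_add]; simp
  · intro acc x _
    show _ = acc + (arr2.map (fun y => if Pacc x y then (1 : Int) else 0)).sum
    rw [← B_perstring arr2 x]
    by_cases h : (sigB x).1 = 0 <;> simp [h]

-- A's inner-loop body evaluates to the Pacc-indicator-weighted product of counts
lemma A_inner_body (arr1 arr2 : List String) (k1 k2 : String) (ans : Int) :
    (if PySem.Int.mod (PySem.Str.len k1 + PySem.Str.len k2) 2 ≠ 0 then ans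
     else
       let r := loopA (k1.toList ++ k2.toList) []
       if r.2 || !r.1.isEmpty then ans
       else ans + (PySem.Dict.counter arr1).getD k1 0 * (PySem.Dict.counter arr2).getD k2 0)
    = ans + (if Pacc k1 k2 then (arr1.count k1 : Int) * (arr2.count k2 : Int) else 0) := by
  rw [show loopA (k1.toList ++ k2.toList) [] = loopA (k1.toList ++ k2.toList) (List.replicate 0 '(') from rfl,
    loopA_replicate]
  by_cases hp : Pacc k1 k2
  · have hrun : run (k1.toList ++ k2.toList) 0 = some 0 := (accept_iff k1 k2).mpr hp
    have hmod : PySem.Int.mod (PySem.Str.len k1 + PySem.Str.len k2) 2 = 0 := by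
      rw [PySem.Int.mod_eq_emod_of_pos (by norm_num), PySem.Str.len_eq, PySem.Str.len_eq]
      have := pacc_even k1 k2 hp
      omega
    rw [if_neg (not_ne_iff.mpr hmod), hrun]
    simp [hp, PySem.Dict.getD_counter]
  · cases hrun : run (k1.toList ++ k2.toList) 0 with
    | none => simp [hp]
    | some m =>
      have hm : m ≠ 0 := by rintro rfl; exact hp ((accept_iff k1 k2).mp hrun)
      have : (List.replicate m '(').isEmpty = false := by
        cases m with
        | zero => exact absurd rfl hm
        | succ k => simp [List.replicate_succ]
      simp [hp, this]

-- A's outer-loop body for a nonempty key k1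
lemma A_outer_body (arr1 arr2 : List String) (k1 : String) (h1 : k1 ≠ "") (ans : Int) :
    (if PySem.Str.pyGet? k1 0 = some ')' then ans
     else (PySem.Set.ofList arr2).foldl (fun answer k2 =>
       if PySem.Int.mod (PySem.Str.len k1 + PySem.Str.len k2) 2 ≠ 0 then answer
       else
         let r := loopA (k1.toList ++ k2.toList) []
         if r.2 || !r.1.isEmpty then answer
         else answer + (PySem.Dict.counter arr1).getD k1 0 * (PySem.Dict.counter arr2).getD k2 0) ans)
    = ans + ((PySem.Set.ofList arr2).map
        (fun k2 => if Pacc k1 k2 then (arr1.count k1 : Int) * (arr2.count k2 : Int) else 0)).sum := by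
  have hget : PySem.Str.pyGet? k1 0 = k1.toList[0]? := by
    have h := PySem.Str.pyGet?_natCast k1 0
    simpa using h
  have hne : k1.toList ≠ [] := fun h => h1 (by apply String.ext; simpa using h)
  obtain ⟨c, rest, hcs⟩ := List.exists_cons_of_ne_nil hne
  by_cases hc : c = ')'
  · rw [if_pos (by rw [hget, hcs, hc]; rfl)]
    have hz : ((PySem.Set.ofList arr2).map
        (fun k2 => if Pacc k1 k2 then (arr1.count k1 : Int) * (arr2.count k2 : Int) else 0)).sum = 0 := by
      apply List.sum_eq_zero
      intro z hz
      simp only [List.mem_map] at hz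
      obtain ⟨k2, _, rfl⟩ := hz
      have : ¬ Pacc k1 k2 := pacc_head k1 k2 c rest (hc ▸ hcs)
      simp [this]
    rw [hz]; ring
  · rw [if_neg (by rw [hget, hcs]; simp [hc])]
    rw [PySem.List.foldl_congr_mem _ _
      (fun answer k2 => answer + (if Pacc k1 k2 then (arr1.count k1 : Int) * (arr2.count k2 : Int) else 0)) ans
      (fun acc k2 _ => A_inner_body arr1 arr2 k1 k2 acc)]
    rw [PySem.List.foldl_add]

lemma A_eq (arr1 arr2 : List String) (hpre : "" ∉ arr1) :
    solution arr1 arr2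
      = (arr1.map (fun x => (arr2.map (fun y => if Pacc x y then (1 : Int) else 0)).sum)).sum := by
  rw [show solution arr1 arr2 = ((PySem.Dict.counter arr1).keys).foldl (fun answer k1 =>
      if PySem.Str.pyGet? k1 0 = some ')' then answer
      else ((PySem.Dict.counter arr2).keys).foldl (fun answer k2 =>
        if PySem.Int.mod (PySem.Str.len k1 + PySem.Str.len k2) 2 ≠ 0 then answer
        else
          let r := loopA (k1.toList ++ k2.toList) []
          if r.2 || !r.1.isEmpty then answer
          else answer + (PySem.Dict.counter arr1).getD k1 0 * (PySem.Dict.counter arr2).getD k2 0) answer) 0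
    from rfl]
  rw [PySem.Dict.keys_counter, PySem.Dict.keys_counter]
  rw [PySem.List.foldl_congr_mem _ _ (fun ans k1 => ans + ((PySem.Set.ofList arr2).map
      (fun k2 => if Pacc k1 k2 then (arr1.count k1 : Int) * (arr2.count k2 : Int) else 0)).sum) 0 ?_]
  · rw [PySem.List.foldl_add, zero_add]
    calc ((PySem.Set.ofList arr1).map (fun k1 => ((PySem.Set.ofList arr2).map
          (fun k2 => if Pacc k1 k2 then (arr1.count k1 : Int) * (arr2.count k2 : Int) else 0)).sum)).sum
        = ((PySem.Set.ofList arr1).map (fun k1 => (arr1.count k1 : Int) * ((PySem.Set.ofList arr2).map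
          (fun k2 => if Pacc k1 k2 then (arr2.count k2 : Int) else 0)).sum)).sum := by
          apply congrArg
          apply List.map_congr_left
          intro k1 _
          rw [← List.sum_map_mul_left]
          apply congrArg
          apply List.map_congr_left
          intro k2 _
          by_cases h : Pacc k1 k2 <;> simp [h]
      _ = (arr1.map (fun x => ((PySem.Set.ofList arr2).map
          (fun k2 => if Pacc x k2 then (arr2.count k2 : Int) else 0)).sum)).sum := by
          exact sum_count_mul _ arr1 (PySem.Set.ofList arr1) (PySem.Set.nodup_ofList arr1)
            (fun x hx => (PySem.Set.mem_ofList arr1 x).mpr hx)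
      _ = (arr1.map (fun x => (arr2.map (fun y => if Pacc x y then (1 : Int) else 0)).sum)).sum := by
          apply congrArg
          apply List.map_congr_left
          intro x _
          calc ((PySem.Set.ofList arr2).map (fun k2 => if Pacc x k2 then (arr2.count k2 : Int) else 0)).sum
              = ((PySem.Set.ofList arr2).map (fun k2 => (arr2.count k2 : Int) *
                  (if Pacc x k2 then (1 : Int) else 0))).sum := by
                apply congrArg
                apply List.map_congr_left
                intro k2 _
                by_cases h : Pacc x k2 <;> simp [h]
            _ = (arr2.map (fun y => if Pacc x y then (1 : Int) else 0)).sum := by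
                exact sum_count_mul _ arr2 (PySem.Set.ofList arr2) (PySem.Set.nodup_ofList arr2)
                  (fun y hy => (PySem.Set.mem_ofList arr2 y).mpr hy)
  · intro acc k1 hk1
    exact A_outer_body arr1 arr2 k1
      (fun h => hpre (h ▸ (PySem.Set.mem_ofList arr1 k1).mp hk1)) acc

-- ===== VERDICT (by name: the statement is the Claim_ definition above) =====
theorem solution_spec : Claim_equal_solution := by
  intro arr1 arr2 _ hpre
  unfold Spec_solution
  rw [A_eq arr1 arr2 hpre, B_eq arr1 arr2]
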